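-- pv_equiv track=rewrite | github.com/hey-dudegg/Daily_Algorithm | 202408/0819/폰켓몬.py | solution
-- ===== SOURCE A (Python) =====
-- def solution(nums):
--     # 문제이해
--     # 입력 : 1차원 리스트, 길이는 10,000이하 자연수의 짝수, 종류번호는 1-200,000
--     # 출력 : 선택할 수 있는 포켓몬 종류 개수의 최댓값 하나
--
--     # 아이디어
--     # 리스트를 집합(set)에 담으면 중복 제거.
--     # 집합의 크기 반환
--
--     # 제한사항
--
--
--     # 문제이해
--     # - N개가 주어짐 -> N/2를 선택하는 문제
--     # - N에 중복된 요소가 있을 수 있고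
--     # - 최대한 중복되지 않는 N/2를 찾는 문제
--     # - 입력 : 폰켓몬 리스트
--     # - 출력 : 내가 고른 폰켓몬 종류의 수
--
--     # 아이디어
--     # - 일단 중복되지 않게 고른다
--     # - 중복되지 않게 고른 후에는 아무거나 골라도 됨
--     # 중복되지 않는 폰켓몬 리스트를 만들기(unique)
--     # - unique의 수와 n/2과 비교
--     #  - unique > n/2: n/2 선택
--     #  - n/2 > unique: unique 선택
--
--     # 제한사항
--     # - n: 10,000 -> 10K
--     # O(n^2) -> 10K*10K -> 100M
--
--     answer = 0
--
--     # 중복없는 폰켓몬 리스트 만들기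
--     # uniq = set(nums)
--     uniq = []
--     for n in nums:
--         if n not in uniq:
--             uniq.append(n)
--
--     selection = len(nums)//2
--     uniq_cnt = len(uniq)
--
--     if selection > uniq_cnt:
--         answer = uniq_cnt
--     else:
--         answer = selection
--
--     return answer
-- ===== SOURCE B (Python) =====
-- def solution(nums):
--     s = sorted(nums)
--     uniq_cnt = 0
--     prev = None
--     for x in s:
--         if prev is None or x != prev:
--             uniq_cnt += 1
--         prev = x
--     return min(uniq_cnt, len(nums) // 2)
-- ===== Notes on version B (the rewrite author's own statement) =====
-- stated objective: faster
-- what changed: Replaces the quadratic membership-scan dedup with sorting a copy and counting distinct values in one adjacent-difference pass, then takes min(distinct, n//2).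
import Mathlib
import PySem

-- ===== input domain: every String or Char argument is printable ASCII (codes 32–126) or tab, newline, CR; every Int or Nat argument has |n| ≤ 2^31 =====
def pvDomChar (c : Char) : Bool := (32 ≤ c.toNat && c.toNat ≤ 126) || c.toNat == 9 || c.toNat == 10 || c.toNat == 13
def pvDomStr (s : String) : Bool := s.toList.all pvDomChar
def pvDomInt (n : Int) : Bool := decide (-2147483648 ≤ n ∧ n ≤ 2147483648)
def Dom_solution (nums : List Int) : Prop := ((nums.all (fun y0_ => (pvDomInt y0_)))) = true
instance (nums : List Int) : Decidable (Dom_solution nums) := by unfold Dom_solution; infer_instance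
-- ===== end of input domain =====

-- B sorts a copy and counts distinct values in one adjacent pass instead of A's
-- quadratic membership-scan dedup; neither version mutates its argument.

-- ===== PORT A =====
def solution (nums : List Int) : Int :=
  let uniq := nums.foldl (fun uniq n => if uniq.contains n then uniq else uniq ++ [n]) []
  let selection := PySem.Int.floordiv (nums.length) 2
  let uniq_cnt : Int := uniq.length
  if selection > uniq_cnt then uniq_cnt else selection

-- ===== PORT B =====
def solution_alt (nums : List Int) : Int :=
  let s := PySem.List.sorted nums (fun x => x) false
  let r := s.foldl
    (fun (acc : Int × Option Int) x =>
      (if acc.2 = none ∨ some x ≠ acc.2 then acc.1 + 1 else acc.1, some x))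
    (0, none)
  min r.1 (PySem.Int.floordiv (nums.length) 2)

-- ===== PRECONDITION & SPEC =====
def Spec_solution (nums : List Int) (out : Int) : Prop := out = solution_alt nums
instance (nums : List Int) (out : Int) : Decidable (Spec_solution nums out) := by unfold Spec_solution; infer_instance

-- ===== CLAIM (what is proved, stated in full; the proofs are below) =====
def Claim_equal_solution : Prop := ∀ (nums : List Int), Dom_solution nums → Spec_solution nums (solution nums)

-- ===== LEMMAS AND PROOFS =====

theorem card_insert_erase (x : Int) (A : Finset Int) :
    (insert x A).card = (A.erase x).card + 1 := by
  rw [← Finset.card_insert_of_notMem (Finset.notMem_erase x A)]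
  congr 1
  ext y
  by_cases h : y = x <;> simp [h]

-- recursive form of B's counting loop
def cntAux : Option Int → List Int → Int
  | _, [] => 0
  | prev, x :: s => (if prev = none ∨ some x ≠ prev then 1 else 0) + cntAux (some x) s

theorem foldB_eq (s : List Int) : ∀ (c : Int) (prev : Option Int),
    (s.foldl
      (fun (acc : Int × Option Int) x =>
        (if acc.2 = none ∨ some x ≠ acc.2 then acc.1 + 1 else acc.1, some x))
      (c, prev)).1 = c + cntAux prev s := by
  induction s with
  | nil => intro c prev; simp [cntAux]
  | cons x s ih =>
      intro c prev
      simp only [List.foldl_cons, cntAux]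
      rw [ih]
      split_ifs <;> ring

-- B's pass over a sorted tail counts the distinct elements other than prev
theorem cntAux_sorted (s : List Int) : ∀ (p : Int),
    s.Pairwise (· ≤ ·) → (∀ y ∈ s, p ≤ y) →
    cntAux (some p) s = ((s.toFinset.erase p).card : Int) := by
  induction s with
  | nil => intro p _ _; simp [cntAux]
  | cons x s ih =>
      intro p hs hp
      have hps : s.Pairwise (· ≤ ·) := hs.of_cons
      have hxle : ∀ y ∈ s, x ≤ y := by
        intro y hy; exact (List.pairwise_cons.mp hs).1 y hy
      have hpx : p ≤ x := hp x (by simp)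
      by_cases hxp : x = p
      · subst hxp
        have : cntAux (some x) (x :: s) = cntAux (some x) s := by
          simp [cntAux]
        rw [this, ih x hps hxle]
        congr 1
        simp [List.toFinset_cons, Finset.erase_insert_eq_erase]
      · have hlt : p < x := lt_of_le_of_ne hpx (fun h => hxp h.symm)
        have : cntAux (some p) (x :: s) = 1 + cntAux (some x) s := by
          simp [cntAux, hxp]
        rw [this, ih x hps hxle]
        have hpnot : p ∉ (x :: s).toFinset := by
          simp only [List.toFinset_cons, Finset.mem_insert, List.mem_toFinset]
          push Not
          exact ⟨fun h => hxp h.symm, fun hmem => absurd (hp p (by simp [hmem])) (by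
            intro _
            exact absurd (hxle p hmem) (not_le.mpr hlt))⟩
        rw [Finset.erase_eq_of_notMem hpnot]
        have hxins : ((x :: s).toFinset).card = (s.toFinset.erase x).card + 1 := by
          simp only [List.toFinset_cons]
          exact card_insert_erase x s.toFinset
        rw [hxins]; push_cast; ring

-- B's count is the number of distinct elements of the sorted list
theorem cntAux_none (s : List Int) (hs : s.Pairwise (· ≤ ·)) :
    cntAux none s = (s.toFinset.card : Int) := by
  cases s with
  | nil => simp [cntAux]
  | cons x s =>
      have hxle : ∀ y ∈ s, x ≤ y := by
        intro y hy; exact (List.pairwise_cons.mp hs).1 y hy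
      have : cntAux none (x :: s) = 1 + cntAux (some x) s := by simp [cntAux]
      rw [this, cntAux_sorted s x hs.of_cons hxle]
      have : ((x :: s).toFinset).card = (s.toFinset.erase x).card + 1 := by
        simp only [List.toFinset_cons]
        exact card_insert_erase x s.toFinset
      rw [this]; push_cast; ring

-- A's loop keeps uniq duplicate-free with exactly the elements seen so far
theorem foldA_inv (nums : List Int) : ∀ (acc : List Int), acc.Nodup →
    (nums.foldl (fun uniq n => if uniq.contains n then uniq else uniq ++ [n]) acc).Nodup ∧
    (nums.foldl (fun uniq n => if uniq.contains n then uniq else uniq ++ [n]) acc).toFinset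
      = acc.toFinset ∪ nums.toFinset := by
  induction nums with
  | nil => intro acc h; simp [h]
  | cons n nums ih =>
      intro acc h
      simp only [List.foldl_cons]
      by_cases hmem : n ∈ acc
      · have hc : acc.contains n = true := by
          simpa [List.contains_iff_mem] using hmem
        rw [if_pos hc]
        obtain ⟨h1, h2⟩ := ih acc h
        refine ⟨h1, ?_⟩
        rw [h2]
        ext y
        simp only [Finset.mem_union, List.mem_toFinset, List.toFinset_cons, Finset.mem_insert]
        constructor
        · tauto
        · rintro (h | (rfl | h)) <;> tauto
      · have hc : ¬ acc.contains n = true := by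
          simpa [List.contains_iff_mem] using hmem
        rw [if_neg hc]
        have hnd : (acc ++ [n]).Nodup := by
          simp only [List.nodup_append, List.nodup_cons, List.nodup_nil, and_true, true_and, h]
          refine ⟨by simp, ?_⟩
          intro a ha b hb
          simp only [List.mem_singleton] at hb
          subst hb
          exact fun hab => hmem (hab ▸ ha)
        obtain ⟨h1, h2⟩ := ih (acc ++ [n]) hnd
        refine ⟨h1, ?_⟩
        rw [h2]
        ext y
        simp only [Finset.mem_union, List.mem_toFinset, List.toFinset_cons, Finset.mem_insert,
          List.mem_append, List.mem_singleton]
        tauto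

-- ===== VERDICT (by name: the statement is the Claim_ definition above) =====
theorem solution_spec : Claim_equal_solution := by
  intro nums _
  unfold Spec_solution solution solution_alt
  obtain ⟨hnd, hfs⟩ := foldA_inv nums [] List.nodup_nil
  set uniq := nums.foldl (fun uniq n => if uniq.contains n then uniq else uniq ++ [n]) [] with huniq
  have hlenA : (uniq.length : Int) = (nums.toFinset.card : Int) := by
    rw [← List.toFinset_card_of_nodup hnd, hfs]
    simp
  set s := PySem.List.sorted nums (fun x => x) false with hsdef
  have hsp : s.Pairwise (· ≤ ·) := PySem.List.sorted_pairwise nums (fun x => x)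
  have hperm : s.Perm nums := PySem.List.sorted_perm nums (fun x => x) false
  have hfseq : s.toFinset = nums.toFinset := by
    ext y; simp only [List.mem_toFinset]; exact hperm.mem_iff
  have hB : (s.foldl
      (fun (acc : Int × Option Int) x =>
        (if acc.2 = none ∨ some x ≠ acc.2 then acc.1 + 1 else acc.1, some x))
      (0, none)).1 = (nums.toFinset.card : Int) := by
    rw [foldB_eq, cntAux_none s hsp, hfseq]; ring
  simp only [hB, hlenA]
  rw [min_def]
  split_ifs <;> omega
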